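-- pv_equiv track=rewrite | github.com/kyunlee/python | programmers/prog115.py | solution
-- ===== SOURCE A (Python) =====
-- def solution(arr):
--     answer1 = arr
--     answer2 = []
--     answer = 0
--
--     while True:
--         for i in answer1:
--             if i%2 == 0 and i >= 50:
--                 answer2.append(i//2)
--             elif i%2 != 0 and i < 50:
--                 answer2.append(i*2+1)
--             else:
--                 answer2.append(i)
--
--         if answer1==answer2: break
--         else:
--             answer +=1
--             answer1 = answer2
--             answer2 = []
--     return answer
-- ===== SOURCE B (Python) =====
-- def solution(arr):
--     best = 0
--     for x in arr:
--         cnt = 0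
--         while True:
--             if x % 2 == 0 and x >= 50:
--                 y = x // 2
--             elif x % 2 != 0 and x < 50:
--                 y = x * 2 + 1
--             else:
--                 y = x
--             if y == x:
--                 break
--             x = y
--             cnt += 1
--         best = max(best, cnt)
--     return best
-- ===== Notes on version B (the rewrite author's own statement) =====
-- stated objective: alternative
-- what changed: Replaces A's round-synchronized whole-array loop (rebuild the entire list each round and compare it to the previous one until a fixed point) with an independent per-element trajectory step count and a running maximum, eliminating the per-round list copies and list-equality comparisons.
import Mathlib
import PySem

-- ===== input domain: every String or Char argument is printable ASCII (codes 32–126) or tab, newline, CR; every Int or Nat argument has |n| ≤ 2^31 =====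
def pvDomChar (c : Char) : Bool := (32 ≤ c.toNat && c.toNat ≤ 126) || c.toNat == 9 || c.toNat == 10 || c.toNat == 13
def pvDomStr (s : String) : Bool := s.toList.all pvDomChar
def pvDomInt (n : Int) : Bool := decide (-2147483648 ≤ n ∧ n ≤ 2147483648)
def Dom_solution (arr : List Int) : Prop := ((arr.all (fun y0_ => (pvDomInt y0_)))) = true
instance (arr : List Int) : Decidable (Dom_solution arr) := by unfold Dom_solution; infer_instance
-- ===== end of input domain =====

-- B replaces A's round-synchronized whole-array loop (rebuild the list each round until it
-- reaches a fixed point) by an independent per-element step count and a running maximum;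
-- equal answers, no per-round list copies/comparisons.

-- ===== PORT A =====
-- the while True loop, made total by a fuel guard (the Python diverges exactly where the
-- fuel could run out; those inputs are excluded by Pre_solution)
def solutionLoop (fuel : Nat) (answer1 : List Int) (answer : Int) : Int :=
  match fuel with
  | 0 => answer
  | fuel + 1 =>
    let answer2 := answer1.foldl (fun acc i =>
      acc ++ [if PySem.Int.mod i 2 = 0 ∧ 50 ≤ i then PySem.Int.floordiv i 2
              else if PySem.Int.mod i 2 ≠ 0 ∧ i < 50 then i * 2 + 1
              else i]) []
    if answer1 = answer2 then answer
    else solutionLoop fuel answer2 (answer + 1)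

def solution (arr : List Int) : Int := solutionLoop (2 ^ 31) arr 0

-- ===== PORT B =====
-- the inner 'while True' of Source B, fuel-guarded the same way
def altStepLoop (fuel : Nat) (x : Int) (cnt : Int) : Int :=
  match fuel with
  | 0 => cnt
  | fuel + 1 =>
    let y := if PySem.Int.mod x 2 = 0 ∧ 50 ≤ x then PySem.Int.floordiv x 2
             else if PySem.Int.mod x 2 ≠ 0 ∧ x < 50 then x * 2 + 1
             else x
    if y = x then cnt else altStepLoop fuel y (cnt + 1)

def solution_alt (arr : List Int) : Int :=
  arr.foldl (fun best x => max best (altStepLoop (2 ^ 31) x 0)) 0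

-- ===== PRECONDITION & SPEC =====
-- Pre_ excludes arrays containing an odd element below -1: on those the Python A (and B)
-- loops forever (the element keeps doubling away), so A never returns.
def Pre_solution (arr : List Int) : Prop := ∀ x ∈ arr, PySem.Int.mod x 2 = 0 ∨ -1 ≤ x
instance (arr : List Int) : Decidable (Pre_solution arr) := by unfold Pre_solution; infer_instance

def pvWitness_solution : List Int := ([100, 3, -1, 0] : List Int)

def Spec_solution (arr : List Int) (out : Int) : Prop := out = solution_alt arr
instance (arr : List Int) (out : Int) : Decidable (Spec_solution arr out) := by unfold Spec_solution; infer_instance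

-- ===== CLAIM (what is proved, stated in full; the proofs are below) =====
def Claim_equal_solution : Prop := ∀ (arr : List Int), Dom_solution arr → Pre_solution arr → Spec_solution arr (solution arr)

-- ===== LEMMAS AND PROOFS =====

-- the one-element transform both programs apply
def pstep (x : Int) : Int :=
  if PySem.Int.mod x 2 = 0 ∧ 50 ≤ x then PySem.Int.floordiv x 2
  else if PySem.Int.mod x 2 ≠ 0 ∧ x < 50 then x * 2 + 1
  else x

-- x is stable after n applications of pstep
def Stab (n : Nat) (x : Int) : Prop := pstep (pstep^[n] x) = pstep^[n] x

-- pure step count with fuel (mirrors Source B's inner while)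
def cnt (fuel : Nat) (x : Int) : Nat :=
  match fuel with
  | 0 => 0
  | f + 1 => if pstep x = x then 0 else cnt f (pstep x) + 1

theorem stab_succ_iff (n : Nat) (x : Int) : Stab (n + 1) x ↔ Stab n (pstep x) := by
  simp [Stab, Function.iterate_succ_apply]

theorem stab_of_fix (n : Nat) (x : Int) (h : pstep x = x) : Stab n x := by
  induction n with
  | zero => exact h
  | succ n ih => rw [stab_succ_iff, h]; exact ih

theorem stab_succ_of (n : Nat) (x : Int) (h : Stab n x) : Stab (n + 1) x := by
  unfold Stab at *
  rw [Function.iterate_succ_apply', h, h]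

theorem stab_mono {n m : Nat} (x : Int) (hnm : n ≤ m) (h : Stab n x) : Stab m x := by
  induction m with
  | zero => have : n = 0 := by omega
            subst this; exact h
  | succ m ih =>
    rcases Nat.lt_or_ge n (m + 1) with hlt | hge
    · exact stab_succ_of m x (ih (by omega))
    · have : n = m + 1 := by omega
      subst this; exact h

-- case lemmas for the one-element transform
theorem pstep_even_big (x : Int) (he : PySem.Int.mod x 2 = 0) (h : 50 ≤ x) :
    pstep x = PySem.Int.floordiv x 2 := by
  unfold pstep; rw [if_pos ⟨he, h⟩]

theorem pstep_fix_odd_big (x : Int) (he : PySem.Int.mod x 2 ≠ 0) (h : 50 ≤ x) : pstep x = x := by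
  unfold pstep
  rw [if_neg (by tauto), if_neg (by rintro ⟨_, h2⟩; omega)]

theorem pstep_fix_even_small (x : Int) (he : PySem.Int.mod x 2 = 0) (h : x < 50) : pstep x = x := by
  unfold pstep
  rw [if_neg (by rintro ⟨_, h2⟩; omega), if_neg (by tauto)]

theorem cnt_fix (f : Nat) (x : Int) (h : pstep x = x) : cnt f x = 0 := by
  cases f <;> simp [cnt, h]

theorem cnt_eq (n : Nat) : ∀ (f g : Nat) (x : Int), Stab n x → n ≤ f → n ≤ g → cnt f x = cnt g x := by
  induction n with
  | zero => intro f g x hs _ _; rw [cnt_fix f x hs, cnt_fix g x hs]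
  | succ n ih =>
    intro f g x hs hf hg
    by_cases h : pstep x = x
    · rw [cnt_fix f x h, cnt_fix g x h]
    · obtain ⟨f', rfl⟩ : ∃ f', f = f' + 1 := ⟨f - 1, by omega⟩
      obtain ⟨g', rfl⟩ : ∃ g', g = g' + 1 := ⟨g - 1, by omega⟩
      simp only [cnt, h, if_false]
      rw [ih f' g' (pstep x) ((stab_succ_iff n x).mp hs) (by omega) (by omega)]

theorem cnt_succ (m f : Nat) (x : Int) (h : pstep x ≠ x) (hs : Stab m x) (hm : m ≤ f) (hf : 0 < f) :
    (cnt f x : Int) = (cnt f (pstep x) : Int) + 1 := by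
  obtain ⟨f', rfl⟩ : ∃ f', f = f' + 1 := ⟨f - 1, by omega⟩
  obtain ⟨m', rfl⟩ : ∃ m', m = m' + 1 := by
    cases m with
    | zero => exact absurd hs h
    | succ m' => exact ⟨m', rfl⟩
  have e1 : cnt (f' + 1) x = cnt f' (pstep x) + 1 := by simp [cnt, h]
  have e2 : cnt f' (pstep x) = cnt (f' + 1) (pstep x) :=
    cnt_eq m' f' (f' + 1) (pstep x) ((stab_succ_iff m' x).mp hs) (by omega) (by omega)
  rw [e1, e2]; push_cast; ring

theorem altStepLoop_eq (f : Nat) : ∀ (x : Int) (c : Int), altStepLoop f x c = c + (cnt f x : Int) := by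
  induction f with
  | zero => intro x c; simp [altStepLoop, cnt]
  | succ f ih =>
    intro x c
    show (if pstep x = x then c else altStepLoop f (pstep x) (c + 1)) = c + (cnt (f + 1) x : Int)
    by_cases h : pstep x = x
    · simp [h, cnt]
    · simp only [h, if_false, cnt, ih]
      push_cast; ring

-- ==== per-element termination bound ====

theorem stab_small (x : Int) (h0 : 0 ≤ x) (h1 : x ≤ 50) : Stab 7 x := by
  interval_cases x <;> (simp only [Stab]; decide)

theorem stab_halving (n : Nat) : ∀ x : Int, 0 ≤ x → x ≤ 50 * 2 ^ n → Stab (n + 7) x := by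
  induction n with
  | zero => intro x h0 h1; exact stab_mono x (by omega) (stab_small x h0 (by simpa using h1))
  | succ n ih =>
    intro x h0 h1
    by_cases hle : x ≤ 50 * 2 ^ n
    · exact stab_mono x (by omega) (ih x h0 hle)
    · have h2n : (1 : Int) ≤ 2 ^ n := one_le_pow₀ (by norm_num)
      have h50 : (50 : Int) ≤ x := by nlinarith
      by_cases he : PySem.Int.mod x 2 = 0
      · have hstep : pstep x = PySem.Int.floordiv x 2 := pstep_even_big x he h50
        have hdiv : PySem.Int.floordiv x 2 = x / 2 :=
          PySem.Int.floordiv_eq_ediv_of_pos (by omega)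
        have hb1 : 0 ≤ x / 2 := by omega
        have hb2 : x / 2 ≤ 50 * 2 ^ n := by
          have h1' : x ≤ 50 * 2 ^ n * 2 := by rw [pow_succ] at h1; linarith
          omega
        have := ih (x / 2) hb1 hb2
        rw [show n + 1 + 7 = (n + 7) + 1 from rfl, stab_succ_iff, hstep, hdiv]
        exact this
      · exact stab_of_fix _ x (pstep_fix_odd_big x he h50)

theorem stab_main (x : Int) (hlo : -2147483648 ≤ x) (hhi : x ≤ 2147483648)
    (hp : PySem.Int.mod x 2 = 0 ∨ -1 ≤ x) : Stab 33 x := by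
  rcases le_or_gt 0 x with hpos | hneg
  · exact stab_halving 26 x hpos (by norm_num; omega)
  · rcases hp with he | hm1
    · exact stab_of_fix _ x (pstep_fix_even_small x he (by omega))
    · have : x = -1 := by omega
      subst this
      exact stab_of_fix _ (-1) (by decide)

-- ==== fold lemmas ====

theorem fold_zero (l : List Int) (c : Int → Int) (h : ∀ x ∈ l, c x = 0) :
    l.foldl (fun m x => max m (c x)) 0 = 0 := by
  induction l with
  | nil => rfl
  | cons x t ih =>
    simp only [List.foldl_cons, h x (by simp)]
    simpa using ih (fun y hy => h y (by simp [hy]))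

theorem fold_shift (c c' : Int → Int) :
    ∀ (l : List Int) (a : Int), 0 ≤ a →
    (∀ x ∈ l, (pstep x = x → c x = 0 ∧ c' x = 0) ∧ (pstep x ≠ x → c x = c' x + 1) ∧ 0 ≤ c' x) →
    l.foldl (fun m x => max m (c x)) (a + 1) = l.foldl (fun m x => max m (c' x)) a + 1 := by
  intro l
  induction l with
  | nil => intro a _ _; rfl
  | cons x t ih =>
    intro a ha hc
    obtain ⟨h1, h2, h3⟩ := hc x (by simp)
    by_cases hfix : pstep x = x
    · obtain ⟨hz, hz'⟩ := h1 hfix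
      simp only [List.foldl_cons, hz, hz']
      rw [max_eq_left (by omega), max_eq_left ha]
      exact ih a ha (fun y hy => hc y (by simp [hy]))
    · have hcx := h2 hfix
      simp only [List.foldl_cons, hcx]
      rw [show max (a + 1) (c' x + 1) = max a (c' x) + 1 from max_add_add_right a (c' x) 1]
      exact ih (max a (c' x)) (le_max_of_le_left ha) (fun y hy => hc y (by simp [hy]))

theorem fold_succ (c c' : Int → Int) :
    ∀ (l : List Int),
    (∀ x ∈ l, (pstep x = x → c x = 0 ∧ c' x = 0) ∧ (pstep x ≠ x → c x = c' x + 1) ∧ 0 ≤ c' x) →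
    (∃ x ∈ l, pstep x ≠ x) →
    l.foldl (fun m x => max m (c x)) 0 = l.foldl (fun m x => max m (c' x)) 0 + 1 := by
  intro l
  induction l with
  | nil => intro _ h; simp at h
  | cons x t ih =>
    intro hc hex
    obtain ⟨h1, h2, h3⟩ := hc x (by simp)
    by_cases hfix : pstep x = x
    · obtain ⟨hz, hz'⟩ := h1 hfix
      simp only [List.foldl_cons, hz, hz', max_self]
      have hex' : ∃ y ∈ t, pstep y ≠ y := by
        rcases hex with ⟨y, hy, hne⟩
        rcases List.mem_cons.mp hy with rfl | hyt
        · exact absurd hfix hne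
        · exact ⟨y, hyt, hne⟩
      simpa using ih (fun y hy => hc y (by simp [hy])) hex'
    · have hcx := h2 hfix
      simp only [List.foldl_cons, hcx]
      rw [max_eq_right (by omega), max_eq_right h3]
      exact fold_shift c c' t (c' x) h3 (fun y hy => hc y (by simp [hy]))

theorem map_self_iff (l : List Int) : l.map pstep = l ↔ ∀ x ∈ l, pstep x = x := by
  induction l with
  | nil => simp
  | cons x t ih => simp only [List.map_cons, List.cons.injEq, List.mem_cons]
                   constructor
                   · rintro ⟨h1, h2⟩ y hy
                     rcases hy with rfl | hyt
                     · exact h1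
                     · exact (ih.mp h2) y hyt
                   · intro h
                     exact ⟨h x (Or.inl rfl), ih.mpr (fun y hy => h y (Or.inr hy))⟩

-- ==== the round loop equals the per-element maximum ====

theorem loopA (n : Nat) : ∀ (f : Nat) (l : List Int) (a : Int),
    (∀ x ∈ l, Stab n x) → n < f → n ≤ 40 →
    solutionLoop f l a = a + l.foldl (fun m x => max m ((cnt (2 ^ 31) x : Int))) 0 := by
  induction n with
  | zero =>
    intro f l a hs hf _
    obtain ⟨f', rfl⟩ : ∃ f', f = f' + 1 := ⟨f - 1, by omega⟩
    have hmap : l.foldl (fun acc i =>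
        acc ++ [if PySem.Int.mod i 2 = 0 ∧ 50 ≤ i then PySem.Int.floordiv i 2
                else if PySem.Int.mod i 2 ≠ 0 ∧ i < 50 then i * 2 + 1 else i]) [] = l.map pstep := by
      rw [PySem.List.foldl_append_singleton_eq_map]; rfl
    have hfixall : ∀ x ∈ l, pstep x = x := fun x hx => hs x hx
    have : l.map pstep = l := (map_self_iff l).mpr hfixall
    show (if l = _ then a else _) = _
    rw [hmap, this, if_pos rfl, fold_zero l _ (fun x hx => by
      rw [cnt_fix _ x (hfixall x hx)]; rfl)]
    ring
  | succ n ih =>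
    intro f l a hs hf hn40
    obtain ⟨f', rfl⟩ : ∃ f', f = f' + 1 := ⟨f - 1, by omega⟩
    have hmap : l.foldl (fun acc i =>
        acc ++ [if PySem.Int.mod i 2 = 0 ∧ 50 ≤ i then PySem.Int.floordiv i 2
                else if PySem.Int.mod i 2 ≠ 0 ∧ i < 50 then i * 2 + 1 else i]) [] = l.map pstep := by
      rw [PySem.List.foldl_append_singleton_eq_map]; rfl
    show (if l = _ then a else _) = _
    rw [hmap]
    by_cases heq : l = l.map pstep
    · have hfixall : ∀ x ∈ l, pstep x = x := (map_self_iff l).mp heq.symm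
      rw [if_pos heq, fold_zero l _ (fun x hx => by rw [cnt_fix _ x (hfixall x hx)]; rfl)]
      ring
    · rw [if_neg heq]
      have hs' : ∀ y ∈ l.map pstep, Stab n y := by
        intro y hy
        obtain ⟨x, hx, rfl⟩ := List.mem_map.mp hy
        exact (stab_succ_iff n x).mp (hs x hx)
      rw [ih f' (l.map pstep) (a + 1) hs' (by omega) (by omega)]
      rw [List.foldl_map]
      have hcond : ∀ x ∈ l, (pstep x = x → (cnt (2 ^ 31) x : Int) = 0 ∧ (cnt (2 ^ 31) (pstep x) : Int) = 0) ∧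
          (pstep x ≠ x → (cnt (2 ^ 31) x : Int) = (cnt (2 ^ 31) (pstep x) : Int) + 1) ∧
          (0 : Int) ≤ (cnt (2 ^ 31) (pstep x) : Int) := by
        intro x hx
        refine ⟨fun hfix => ?_, fun hne => ?_, by positivity⟩
        · rw [cnt_fix _ x hfix, hfix, cnt_fix _ x hfix]; simp
        · exact cnt_succ (n + 1) (2 ^ 31) x hne (hs x hx)
            (by have : (2 : Nat) ^ 31 = 2147483648 := by norm_num
                omega) (by norm_num)
      have hex : ∃ x ∈ l, pstep x ≠ x := by
        by_contra hcon
        push Not at hcon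
        exact heq ((map_self_iff l).mpr hcon).symm
      rw [fold_succ _ _ l hcond hex]
      ring

-- ===== VERDICT (by name: the statement is the Claim_ definition above) =====
theorem solution_spec : Claim_equal_solution := by
  intro arr hdom hpre
  unfold Spec_solution solution solution_alt
  have hdom' : ∀ x ∈ arr, -2147483648 ≤ x ∧ x ≤ 2147483648 := by
    intro x hx
    have := List.all_eq_true.mp hdom x hx
    simpa [pvDomInt] using this
  have hstab : ∀ x ∈ arr, Stab 33 x := fun x hx =>
    stab_main x (hdom' x hx).1 (hdom' x hx).2 (hpre x hx)
  rw [loopA 33 (2 ^ 31) arr 0 hstab (by norm_num) (by norm_num)]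
  simp [altStepLoop_eq]
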